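-- pv_equiv track=rewrite | github.com/pedrohnsc2/marley-v2 | rna_entropy/08_aso_design.py | check_self_complementarity
-- ===== SOURCE A (Python) =====
-- from typing import Any, Final
--
-- COMPLEMENT: Final[dict[str, str]] = {
--     "A": "T",
--     "T": "A",
--     "G": "C",
--     "C": "G",
--     "U": "A",
-- }
--
-- def check_self_complementarity(
--     sequence: str,
-- ) -> tuple[int, list[tuple[int, int]]]:
--     """Detect potential hairpin formation in an ASO sequence.
--
--     For each pair of positions (i, j) where j > i + 3 (minimum loop size = 3),
--     checks if the bases at i and j are complementary.  Tracks the longest run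
--     of consecutive complementary pairs that could form a hairpin stem.
--
--     Args:
--         sequence: ASO DNA sequence (case-insensitive).
--
--     Returns:
--         Tuple of (max_consecutive_pairs, hairpin_positions) where
--         hairpin_positions is a list of (stem_start, stem_end) tuples for
--         each detected hairpin region with >= 3 consecutive pairs.
--     """
--     seq = sequence.upper()
--     n = len(seq)
--     max_consecutive = 0
--     hairpin_positions: list[tuple[int, int]] = []
--
--     # Slide a potential stem start along the sequence
--     for i in range(n):
--         # The partner must be at least 4 positions away (3 nt loop minimum)
--         for j in range(i + 4, n):
--             # Count consecutive complementary pairs starting at (i, j)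
--             # moving inward: i+k pairs with j-k
--             consecutive = 0
--             k = 0
--             while (i + k) < (j - k) and (j - k) >= 0:
--                 base_left = seq[i + k]
--                 base_right = seq[j - k]
--                 # Check if bases are complementary
--                 if COMPLEMENT.get(base_left) == base_right:
--                     consecutive += 1
--                     k += 1
--                 else:
--                     break
--
--             if consecutive > max_consecutive:
--                 max_consecutive = consecutive
--
--             # Record hairpin positions if stem is >= 3 pairs
--             if consecutive >= 3:
--                 hairpin_positions.append((i, i + consecutive - 1))
--
--     return max_consecutive, hairpin_positions
-- ===== SOURCE B (Python) =====
-- COMPLEMENT = {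
--     "A": "T",
--     "T": "A",
--     "G": "C",
--     "C": "G",
--     "U": "A",
-- }
--
-- def check_self_complementarity(sequence):
--     """O(n^2) with small constants: bottom-up rolling-row DP
--     L(i,j) = 1 + L(i+1,j-1), touched only at the positions j that hold the
--     complement of base i (via a positions index), with a slice max per row."""
--     seq = sequence.upper()
--     n = len(seq)
--     pos = {}
--     for j in range(n):
--         pos.setdefault(seq[j], []).append(j)
--     prev = [0] * n
--     max_consecutive = 0
--     chunks = []
--     for i in range(n - 1, -1, -1):
--         cur = [0] * n
--         chunk = []
--         for j in pos.get(COMPLEMENT.get(seq[i]), ()):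
--             if j > i:
--                 c = 1 + prev[j - 1]
--                 cur[j] = c
--                 if j >= i + 4 and c >= 3:
--                     chunk.append((i, i + c - 1))
--         m = max(cur[i + 4:], default=0)
--         if m > max_consecutive:
--             max_consecutive = m
--         chunks.append(chunk)
--         prev = cur
--     chunks.reverse()
--     hairpins = [p for ch in chunks for p in ch]
--     return max_consecutive, hairpins
-- ===== Notes on version B (the rewrite author's own statement) =====
-- stated objective: faster
-- what changed: A recounts each stem from scratch with an inward while-scan per pair (i,j); B builds all stem lengths bottom-up with a rolling-row DP (row i derived from row i+1 via L(i,j) = 1 + L(i+1,j-1) on complementary bases) and then derives the max and the hairpin list in staged comprehension passes over the table.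
import Mathlib
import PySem

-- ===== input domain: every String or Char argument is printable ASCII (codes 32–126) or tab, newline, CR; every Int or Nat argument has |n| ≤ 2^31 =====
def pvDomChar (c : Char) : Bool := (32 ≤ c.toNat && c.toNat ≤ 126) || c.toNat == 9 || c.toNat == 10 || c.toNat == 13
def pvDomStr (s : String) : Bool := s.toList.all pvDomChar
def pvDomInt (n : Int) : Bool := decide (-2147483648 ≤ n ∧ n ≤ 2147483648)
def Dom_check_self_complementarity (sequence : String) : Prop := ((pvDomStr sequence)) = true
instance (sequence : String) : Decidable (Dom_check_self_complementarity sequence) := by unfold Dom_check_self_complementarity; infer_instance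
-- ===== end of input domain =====

-- B replaces A's cubic per-pair inward rescans by a bottom-up rolling-row DP
-- (row i from row i+1 via L(i,j) = 1 + L(i+1,j-1), touched only at the positions
-- holding the complement of base i, via a positions index built once), with a
-- per-row max and per-row hairpin chunks collected and flattened at the end.

-- shared helper: the module constant COMPLEMENT, as a lookup on the single character
-- (COMPLEMENT.get(c): exact — the dict's keys are the five single-character strings)
def compGet (c : Char) : Option Char :=
  if c = 'A' then some 'T'
  else if c = 'T' then some 'A'
  else if c = 'G' then some 'C'
  else if c = 'C' then some 'G'
  else if c = 'U' then some 'A'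
  else none

-- ===== PORT A =====
-- A's inner while loop: count consecutive complementary pairs at (i+k, j-k) moving inward.
-- Indices i+k, j-k are always in range (i+k < j-k < n), so list reads use getD; the
-- Python guard (j-k) >= 0 is subsumed by i+k < j-k over Nat (both sides nonnegative).
-- fuel = a totality guard only: the scan advances k and stops before k exceeds j,
-- so fuel j + 1 is never exhausted.
def runA (cs : List Char) (i j k : Nat) : Nat → Nat
  | 0 => 0
  | fuel + 1 =>
    if i + k < j - k then
      if compGet (cs.getD (i + k) ' ') = some (cs.getD (j - k) ' ') then
        1 + runA cs i j (k + 1) fuel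
      else 0
    else 0

def check_self_complementarity (sequence : String) : Int × (List (Int × Int)) :=
  let cs := (PySem.Str.upper sequence).toList
  let n := cs.length
  -- for i in range(n): for j in range(i+4, n): …
  (List.range n).foldl
    (fun st i =>
      (List.range' (i + 4) (n - (i + 4))).foldl
        (fun (st : Nat × List (Int × Int)) j =>
          let consecutive := runA cs i j 0 (j + 1)
          let maxc := if st.1 < consecutive then consecutive else st.1
          let hp := if 3 ≤ consecutive then st.2 ++ [((i : Int), (i : Int) + (consecutive : Int) - 1)] else st.2
          (maxc, hp))
        st)
    (0, [])
  |> fun st => ((st.1 : Int), st.2)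

-- ===== PORT B =====
-- Source B's positions index: for j in range(n): pos.setdefault(seq[j], []).append(j)
-- (setdefault-then-append is exactly Dict.modify with default [])
def buildPos (cs : List Char) : PySem.Dict Char (List Nat) :=
  (List.range cs.length).foldl (fun d j => d.modify (cs.getD j ' ') [] (· ++ [j])) PySem.Dict.empty

-- Source B's pos.get(COMPLEMENT.get(seq[i]), ()): the matching positions for row i
-- (COMPLEMENT.get returns None for a non-key base; pos.get(None, ()) is then empty)
def jsOf (cs : List Char) (pos : PySem.Dict Char (List Nat)) (i : Nat) : List Nat :=
  match compGet (cs.getD i ' ') with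
  | some t => pos.getD t []
  | none => []

-- Source B's inner loop over the matching positions j of row i: cur[j] = 1 + prev[j-1]
-- (list assignment on an in-range index) and the row's hairpin chunk
def innerB (i n : Nat) (prev : List Nat) (js : List Nat) : List Nat × List (Int × Int) :=
  js.foldl (fun (st : List Nat × List (Int × Int)) j =>
      if i < j then
        let c := 1 + prev.getD (j - 1) 0
        (st.1.set j c,
         if i + 4 ≤ j ∧ 3 ≤ c then st.2 ++ [((i : Int), (i : Int) + (c : Int) - 1)] else st.2)
      else st)
    (List.replicate n 0, [])

-- Source B's downward loop 'for i in range(n-1, -1, -1)' with chunks.append + final reverse,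
-- ported as the cons-accumulating recursion it amounts to; state = (prev row, running max,
-- chunks of rows n-k .. n-1 in index order).  max(cur[i+4:], default=0) is the foldl max 0
-- of the dropped row (exact: the entries are Nats).
def loopB (cs : List Char) (n : Nat) (pos : PySem.Dict Char (List Nat)) : Nat → List Nat × Nat × List (List (Int × Int))
  | 0 => (List.replicate n 0, 0, [])
  | k + 1 =>
    let st := loopB cs n pos k
    let i := n - (k + 1)
    let cur_chunk := innerB i n st.1 (jsOf cs pos i)
    let m := (cur_chunk.1.drop (i + 4)).foldl max 0
    (cur_chunk.1, (if st.2.1 < m then m else st.2.1), cur_chunk.2 :: st.2.2)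

def check_self_complementarity_alt (sequence : String) : Int × (List (Int × Int)) :=
  let cs := (PySem.Str.upper sequence).toList
  let n := cs.length
  let pos := buildPos cs
  let st := loopB cs n pos n
  -- hairpins = [p for ch in chunks for p in ch]
  ((st.2.1 : Int), st.2.2.flatten)

-- ===== PRECONDITION & SPEC =====
def Spec_check_self_complementarity (sequence : String) (out : Int × (List (Int × Int))) : Prop := out = check_self_complementarity_alt sequence
instance (sequence : String) (out : Int × (List (Int × Int))) : Decidable (Spec_check_self_complementarity sequence out) := by unfold Spec_check_self_complementarity; infer_instance

-- ===== CLAIM (what is proved, stated in full; the proofs are below) =====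
def Claim_equal_check_self_complementarity : Prop := ∀ (sequence : String), Dom_check_self_complementarity sequence → Spec_check_self_complementarity sequence (check_self_complementarity sequence)

-- ===== LEMMAS AND PROOFS =====

-- the common mathematical stem length both programs compute
def stemSpec (cs : List Char) (i j : Nat) : Nat :=
  if _h : i < j then
    if compGet (cs.getD i ' ') = some (cs.getD j ' ') then
      1 + (if _h2 : i + 1 < j - 1 then stemSpec cs (i + 1) (j - 1) else 0)
    else 0
  else 0
termination_by j - i
decreasing_by omega

-- per-row summaries of the common value
def rowMax (cs : List Char) (i : Nat) : Nat :=
  (List.range' (i + 4) (cs.length - (i + 4))).foldl (fun m j => max m (stemSpec cs i j)) 0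

def rowChunk (cs : List Char) (i : Nat) : List (Int × Int) :=
  ((List.range' (i + 4) (cs.length - (i + 4))).filter (fun j => decide (3 ≤ stemSpec cs i j))).map
    (fun j => ((i : Int), (i : Int) + (stemSpec cs i j : Int) - 1))

lemma stemSpec_zero (cs : List Char) (i j : Nat) (h : ¬ i < j) : stemSpec cs i j = 0 := by
  rw [stemSpec, dif_neg h]

lemma stemSpec_of_comp (cs : List Char) (i j : Nat) (hij : i < j)
    (hc : compGet (cs.getD i ' ') = some (cs.getD j ' ')) :
    stemSpec cs i j = 1 + stemSpec cs (i + 1) (j - 1) := by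
  rw [stemSpec, dif_pos hij, if_pos hc]
  congr 1
  by_cases h2 : i + 1 < j - 1
  · rw [dif_pos h2]
  · rw [dif_neg h2, stemSpec_zero cs (i + 1) (j - 1) h2]

lemma stemSpec_of_not_comp (cs : List Char) (i j : Nat)
    (hc : ¬ compGet (cs.getD i ' ') = some (cs.getD j ' ')) : stemSpec cs i j = 0 := by
  rw [stemSpec]
  by_cases hij : i < j
  · rw [dif_pos hij, if_neg hc]
  · rw [dif_neg hij]

lemma runA_eq_stemSpec (cs : List Char) : ∀ (fuel i j k : Nat), j + 1 ≤ fuel + k →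
    runA cs i j k fuel = if i + k < j - k then stemSpec cs (i + k) (j - k) else 0 := by
  intro fuel
  induction fuel with
  | zero =>
    intro i j k hf
    have : ¬ i + k < j - k := by omega
    simp [runA, this]
  | succ fuel ih =>
    intro i j k hf
    rw [runA]
    by_cases hcond : i + k < j - k
    · rw [if_pos hcond, if_pos hcond]
      by_cases hc : compGet (cs.getD (i + k) ' ') = some (cs.getD (j - k) ' ')
      · rw [if_pos hc]
        rw [ih i j (k + 1) (by omega)]
        rw [stemSpec_of_comp cs (i + k) (j - k) (by omega) hc]
        congr 1
        have e1 : j - (k + 1) = j - k - 1 := by omega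
        have e2 : i + (k + 1) = i + k + 1 := by omega
        rw [e1, e2]
        by_cases h2 : i + k + 1 < j - k - 1
        · rw [if_pos h2]
        · rw [if_neg h2, stemSpec_zero cs (i + k + 1) (j - k - 1) h2]
      · rw [if_neg hc, stemSpec_of_not_comp cs (i + k) (j - k) hc]
    · rw [if_neg hcond, if_neg hcond]

-- inner loop over j with the pair accumulator = two passes (running max; filter+map)
lemma splitInner (c : Nat → Nat) (out : Nat → Int × Int) :
    ∀ (js : List Nat) (m : Nat) (h : List (Int × Int)),
      js.foldl (fun (st : Nat × List (Int × Int)) j =>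
          (if st.1 < c j then c j else st.1,
           if 3 ≤ c j then st.2 ++ [out j] else st.2)) (m, h)
      = (js.foldl (fun m j => max m (c j)) m,
         h ++ (js.filter (fun j => decide (3 ≤ c j))).map out) := by
  intro js
  induction js with
  | nil => intro m h; simp
  | cons j js ih =>
    intro m h
    rw [List.foldl_cons, List.foldl_cons, ih]
    have hmax : (if m < c j then c j else m) = max m (c j) := by
      rw [Nat.max_def]; split_ifs <;> omega
    rw [hmax, List.filter_cons]
    by_cases h3 : 3 ≤ c j
    · simp [h3]
    · simp [h3]

-- the whole nested pair-accumulator loop of A, split into the two quantities, for any v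
lemma splitA (v : Nat → Nat → Nat) (Lj : Nat → List Nat) :
    ∀ (is : List Nat) (m : Nat) (h : List (Int × Int)),
      is.foldl (fun st i => (Lj i).foldl (fun (st : Nat × List (Int × Int)) j =>
          (if st.1 < v i j then v i j else st.1,
           if 3 ≤ v i j then st.2 ++ [((i : Int), (i : Int) + (v i j : Int) - 1)] else st.2)) st) (m, h)
      = (is.foldl (fun m i => (Lj i).foldl (fun m j => max m (v i j)) m) m,
         h ++ is.flatMap (fun i => ((Lj i).filter (fun j => decide (3 ≤ v i j))).map
             (fun j => ((i : Int), (i : Int) + (v i j : Int) - 1)))) := by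
  intro is
  induction is with
  | nil => intro m h; simp
  | cons i is ih =>
    intro m h
    rw [List.foldl_cons, List.foldl_cons, splitInner, ih, List.flatMap_cons, List.append_assoc]

-- running max with a nonzero start
lemma foldl_max_init (f : Nat → Nat) :
    ∀ (l : List Nat) (a : Nat),
      l.foldl (fun m j => max m (f j)) a = max a (l.foldl (fun m j => max m (f j)) 0) := by
  intro l
  induction l with
  | nil => intro a; simp
  | cons x l ih =>
    intro a
    rw [List.foldl_cons, List.foldl_cons, ih (max a (f x)), ih (max 0 (f x))]
    rw [Nat.zero_max, Nat.max_assoc]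

-- running max is order-insensitive
lemma foldl_max_reverse (f : Nat → Nat) :
    ∀ (l : List Nat),
      l.reverse.foldl (fun m j => max m (f j)) 0 = l.foldl (fun m j => max m (f j)) 0 := by
  intro l
  induction l with
  | nil => rfl
  | cons x l ih =>
    rw [List.reverse_cons, List.foldl_append, ih]
    simp only [List.foldl_cons, List.foldl_nil]
    rw [foldl_max_init f l (max 0 (f x))]
    simp [Nat.max_comm]

-- the positions index: pos[t] lists exactly the indices holding t, ascending
lemma getD_buildPos (cs : List Char) (t : Char) :
    (buildPos cs).getD t [] = (List.range cs.length).filter (fun j => cs.getD j ' ' == t) := by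
  have h := PySem.Dict.getD_foldl_modify_append
    (l := (List.range cs.length).map (fun j => (cs.getD j ' ', j)))
    (d := PySem.Dict.empty) (c := t)
  rw [List.foldl_map] at h
  unfold buildPos
  rw [h]
  simp [List.filter_map, List.map_map, Function.comp_def]

-- the matching positions of row i: exactly the j whose base complements base i
lemma jsOf_eq (cs : List Char) (i : Nat) :
    jsOf cs (buildPos cs) i
      = (List.range cs.length).filter (fun j => compGet (cs.getD i ' ') == some (cs.getD j ' ')) := by
  unfold jsOf
  cases hc : compGet (cs.getD i ' ') with
  | none =>
    symm
    apply List.filter_eq_nil_iff.mpr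
    intro x _
    simp
  | some t =>
    show (buildPos cs).getD t []
      = (List.range cs.length).filter (fun j => (some t : Option Char) == some (cs.getD j ' '))
    rw [getD_buildPos]
    apply List.filter_congr
    intro x _
    simp [eq_comm]

-- the set-updating fold over the matching positions, element-wise
lemma setFold_getD (i : Nat) (v : Nat → Nat) :
    ∀ (js : List Nat) (cur : List Nat), (∀ x ∈ js, x < cur.length) → ∀ (j : Nat),
      ((js.foldl (fun cur j => if i < j then cur.set j (v j) else cur) cur).getD j 0)
        = if j ∈ js ∧ i < j then v j else cur.getD j 0 := by
  intro js
  induction js with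
  | nil => intro cur _ j; simp
  | cons x js ih =>
    intro cur hlt j
    rw [List.foldl_cons]
    rw [ih _ (by intro y hy; have := hlt y (List.mem_cons_of_mem x hy)
                 by_cases hx : i < x <;> simp [hx, List.length_set, this]) j]
    by_cases hj : j ∈ js ∧ i < j
    · rw [if_pos hj, if_pos ⟨List.mem_cons_of_mem x hj.1, hj.2⟩]
    · rw [if_neg hj]
      by_cases hjx : j = x
      · subst hjx
        by_cases hij : i < j
        · rw [if_pos hij, if_pos ⟨List.mem_cons_self, hij⟩]
          have hlen : j < cur.length := hlt j List.mem_cons_self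
          simp [List.getD_eq_getElem?_getD, hlen]
        · rw [if_neg hij, if_neg (by tauto)]
      · have hno : ¬ (j ∈ x :: js ∧ i < j) := by
          intro ⟨hmem, hij⟩
          rcases List.mem_cons.mp hmem with h | h
          · exact hjx h
          · exact hj ⟨h, hij⟩
        rw [if_neg hno]
        by_cases hix : i < x
        · rw [if_pos hix]
          simp [List.getD_eq_getElem?_getD, List.getElem?_set_ne (fun h => hjx h.symm)]
        · rw [if_neg hix]

lemma setFold_length (i : Nat) (v : Nat → Nat) :
    ∀ (js : List Nat) (cur : List Nat),
      (js.foldl (fun cur j => if i < j then cur.set j (v j) else cur) cur).length = cur.length := by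
  intro js
  induction js with
  | nil => intro cur; rfl
  | cons x js ih =>
    intro cur
    rw [List.foldl_cons, ih]
    by_cases hx : i < x <;> simp [hx]

-- the inner fold, split into the row update and the chunk
lemma innerB_eq (i : Nat) (prev : List Nat) : ∀ (js : List Nat) (cur0 : List Nat) (ch0 : List (Int × Int)),
    js.foldl (fun (st : List Nat × List (Int × Int)) j =>
        if i < j then
          (st.1.set j (1 + prev.getD (j - 1) 0),
           if i + 4 ≤ j ∧ 3 ≤ 1 + prev.getD (j - 1) 0
             then st.2 ++ [((i : Int), (i : Int) + ((1 + prev.getD (j - 1) 0 : Nat) : Int) - 1)] else st.2)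
        else st) (cur0, ch0)
      = (js.foldl (fun cur j => if i < j then cur.set j (1 + prev.getD (j - 1) 0) else cur) cur0,
         ch0 ++ (js.filter (fun j => decide (i < j ∧ (i + 4 ≤ j ∧ 3 ≤ 1 + prev.getD (j - 1) 0)))).map
           (fun j => ((i : Int), (i : Int) + ((1 + prev.getD (j - 1) 0 : Nat) : Int) - 1))) := by
  intro js
  induction js with
  | nil => intro cur0 ch0; simp
  | cons x js ih =>
    intro cur0 ch0
    rw [List.foldl_cons, List.foldl_cons, List.filter_cons]
    by_cases hx : i < x
    · rw [if_pos hx, if_pos hx]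
      by_cases hq : i + 4 ≤ x ∧ 3 ≤ 1 + prev.getD (x - 1) 0
      · rw [if_pos hq, ih,
          decide_eq_true (show i < x ∧ (i + 4 ≤ x ∧ 3 ≤ 1 + prev.getD (x - 1) 0) from ⟨hx, hq⟩),
          if_pos rfl]
        simp [List.append_assoc]
      · rw [if_neg hq, ih,
          decide_eq_false (show ¬ (i < x ∧ (i + 4 ≤ x ∧ 3 ≤ 1 + prev.getD (x - 1) 0)) from fun h => hq h.2)]
        simp only [Bool.false_eq_true, if_false]
    · rw [if_neg hx, if_neg hx, ih,
        decide_eq_false (show ¬ (i < x ∧ (i + 4 ≤ x ∧ 3 ≤ 1 + prev.getD (x - 1) 0)) from fun h => hx h.1)]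
      simp only [Bool.false_eq_true, if_false]

-- splitting an ascending integer range at a lower bound
lemma range_filter_ge (n d : Nat) (q : Nat → Bool) :
    (List.range n).filter (fun j => decide (d ≤ j) && q j) = (List.range' d (n - d)).filter q := by
  by_cases hd : d ≤ n
  · obtain ⟨m, rfl⟩ : ∃ m, n = d + m := ⟨n - d, by omega⟩
    rw [List.range_add, List.filter_append]
    rw [List.filter_eq_nil_iff.mpr (by
      intro x hx
      have hxd := List.mem_range.mp hx
      simp [show ¬ d ≤ x by omega])]
    rw [List.nil_append, List.filter_map]
    rw [show d + m - d = m by omega, List.range'_eq_map_range, List.filter_map]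
    refine congrArg _ (List.filter_congr ?_)
    intro x _
    simp [Function.comp, show d ≤ d + x by omega]
  · rw [show n - d = 0 by omega]
    simp only [List.range'_zero, List.filter_nil]
    apply List.filter_eq_nil_iff.mpr
    intro x hx
    have hxn := List.mem_range.mp hx
    simp [show ¬ d ≤ x by omega]

-- the updated row holds the stem lengths of row i, given the row below
lemma cur_getD (cs : List Char) (i : Nat) (prev : List Nat)
    (hprev : ∀ x, x < cs.length → prev.getD x 0 = stemSpec cs (i + 1) x) :
    ∀ j, j < cs.length →
      ((jsOf cs (buildPos cs) i).foldl
          (fun cur j => if i < j then cur.set j (1 + prev.getD (j - 1) 0) else cur)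
          (List.replicate cs.length 0)).getD j 0 = stemSpec cs i j := by
  intro j hj
  rw [jsOf_eq]
  rw [setFold_getD i _ _ (List.replicate cs.length 0) (by
    intro x hx
    have := List.mem_range.mp (List.mem_of_mem_filter hx)
    simpa using this) j]
  have hrepl : (List.replicate cs.length (0 : Nat)).getD j 0 = 0 := by
    rw [List.getD_eq_getElem?_getD, List.getElem?_replicate]
    simp [hj]
  by_cases hcase : (j ∈ (List.range cs.length).filter
      (fun j => compGet (cs.getD i ' ') == some (cs.getD j ' '))) ∧ i < j
  · rw [if_pos hcase]
    obtain ⟨hmem, hij⟩ := hcase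
    have hcomp : compGet (cs.getD i ' ') = some (cs.getD j ' ') := by
      have := List.of_mem_filter hmem
      simpa using this
    rw [stemSpec_of_comp cs i j hij hcomp]
    congr 1
    exact hprev (j - 1) (by omega)
  · rw [if_neg hcase, hrepl]
    by_cases hij : i < j
    · have hnc : ¬ compGet (cs.getD i ' ') = some (cs.getD j ' ') := by
        intro hcomp
        exact hcase ⟨List.mem_filter.mpr ⟨List.mem_range.mpr hj, by rw [hcomp]; exact beq_self_eq_true _⟩, hij⟩
      rw [stemSpec_of_not_comp cs i j hnc]
    · rw [stemSpec_zero cs i j hij]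

-- the chunk collected for row i is exactly the hairpin sub-list A appends for i
lemma chunk_eq (cs : List Char) (i : Nat) (prev : List Nat)
    (hprev : ∀ x, x < cs.length → prev.getD x 0 = stemSpec cs (i + 1) x) :
    ((jsOf cs (buildPos cs) i).filter
        (fun j => decide (i < j ∧ (i + 4 ≤ j ∧ 3 ≤ 1 + prev.getD (j - 1) 0)))).map
      (fun j => ((i : Int), (i : Int) + ((1 + prev.getD (j - 1) 0 : Nat) : Int) - 1))
      = rowChunk cs i := by
  have key : ∀ j, j < cs.length →
      ((compGet (cs.getD i ' ') = some (cs.getD j ' ')) ∧ i < j ∧ i + 4 ≤ j ∧ 3 ≤ 1 + prev.getD (j - 1) 0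
        ↔ (i + 4 ≤ j ∧ 3 ≤ stemSpec cs i j)) := by
    intro j hj
    constructor
    · rintro ⟨hcomp, hij, h4, h3⟩
      refine ⟨h4, ?_⟩
      rw [stemSpec_of_comp cs i j hij hcomp]
      rw [hprev (j - 1) (by omega)] at h3
      exact h3
    · rintro ⟨h4, h3⟩
      have hij : i < j := by
        by_contra hij
        rw [stemSpec_zero cs i j hij] at h3; omega
      have hcomp : compGet (cs.getD i ' ') = some (cs.getD j ' ') := by
        by_contra hcomp
        rw [stemSpec_of_not_comp cs i j hcomp] at h3; omega
      refine ⟨hcomp, hij, h4, ?_⟩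
      rw [stemSpec_of_comp cs i j hij hcomp] at h3
      rw [hprev (j - 1) (by omega)]
      exact h3
  rw [jsOf_eq, List.filter_filter]
  have step1 : (List.range cs.length).filter
      (fun j => decide (i < j ∧ (i + 4 ≤ j ∧ 3 ≤ 1 + prev.getD (j - 1) 0))
        && (compGet (cs.getD i ' ') == some (cs.getD j ' ')))
      = (List.range cs.length).filter (fun j => decide (i + 4 ≤ j) && decide (3 ≤ stemSpec cs i j)) := by
    apply List.filter_congr
    intro j hjr
    have hj := List.mem_range.mp hjr
    have hk := key j hj
    by_cases hR : i + 4 ≤ j ∧ 3 ≤ stemSpec cs i j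
    · have hL := hk.mpr hR
      rw [Bool.eq_iff_iff]
      simp only [decide_eq_true_eq, Bool.and_eq_true, beq_iff_eq]
      constructor
      · intro _; simp [hR.1, hR.2]
      · intro _; exact ⟨⟨hL.2.1, hL.2.2.1, hL.2.2.2⟩, hL.1⟩
    · have hL : ¬ (compGet (cs.getD i ' ') = some (cs.getD j ' ')
          ∧ i < j ∧ i + 4 ≤ j ∧ 3 ≤ 1 + prev.getD (j - 1) 0) := fun h => hR (hk.mp h)
      rw [Bool.eq_iff_iff]
      simp only [decide_eq_true_eq, Bool.and_eq_true, beq_iff_eq]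
      constructor
      · intro h; exact absurd ⟨h.2, h.1.1, h.1.2.1, h.1.2.2⟩ hL
      · intro h; exact absurd h hR
  rw [step1, range_filter_ge cs.length (i + 4) (fun j => decide (3 ≤ stemSpec cs i j))]
  unfold rowChunk
  apply List.map_congr_left
  intro j hjmem
  have hjprop := List.of_mem_filter hjmem
  have hjrange := List.mem_of_mem_filter hjmem
  obtain ⟨h1, h2⟩ := List.mem_range'_1.mp hjrange
  have h3 : 3 ≤ stemSpec cs i j := by simpa using hjprop
  have hij : i < j := by
    by_contra hij
    rw [stemSpec_zero cs i j hij] at h3; omega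
  have hcomp : compGet (cs.getD i ' ') = some (cs.getD j ' ') := by
    by_contra hcomp
    rw [stemSpec_of_not_comp cs i j hcomp] at h3; omega
  rw [stemSpec_of_comp cs i j hij hcomp, hprev (j - 1) (by omega)]

-- a full row read back as the values over its index range
lemma drop_eq_map_range (cur : List Nat) (n d : Nat) (hlen : cur.length = n) :
    cur.drop d = (List.range' d (n - d)).map (fun j => cur.getD j 0) := by
  apply List.ext_getElem
  · simp [hlen]
  · intro x h1 h2
    simp only [List.getElem_drop, List.getElem_map, List.getElem_range']
    have hx : d + x < n := by simp [hlen] at h1; omega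
    rw [List.getD_eq_getElem?_getD, List.getElem?_eq_getElem (by omega)]
    simp [Nat.add_comm d x]

-- the main loop invariant: after k steps, prev is row n-k, the max and the chunks
-- cover rows n-k .. n-1
lemma loopB_spec (cs : List Char) : ∀ (k : Nat), k ≤ cs.length →
    ((loopB cs cs.length (buildPos cs) k).1.length = cs.length) ∧
    (∀ j, j < cs.length →
      (loopB cs cs.length (buildPos cs) k).1.getD j 0 = stemSpec cs (cs.length - k) j) ∧
    ((loopB cs cs.length (buildPos cs) k).2.1
      = ((List.range' (cs.length - k) k).reverse).foldl (fun m i => max m (rowMax cs i)) 0) ∧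
    ((loopB cs cs.length (buildPos cs) k).2.2 = (List.range' (cs.length - k) k).map (rowChunk cs)) := by
  intro k
  induction k with
  | zero =>
    intro _
    refine ⟨by simp [loopB], ?_, by simp [loopB], by simp [loopB]⟩
    intro j hj
    simp only [loopB, Nat.sub_zero]
    rw [stemSpec_zero cs cs.length j (by omega)]
    rw [List.getD_eq_getElem?_getD, List.getElem?_replicate]
    simp [hj]
  | succ k ih =>
    intro hk
    obtain ⟨ihlen, ihrow, ihmax, ihch⟩ := ih (by omega)
    simp only [loopB]
    unfold innerB
    rw [innerB_eq]
    have hprev : ∀ x, x < cs.length →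
        (loopB cs cs.length (buildPos cs) k).1.getD x 0
          = stemSpec cs (cs.length - (k + 1) + 1) x := by
      intro x hx
      rw [ihrow x hx]
      congr 1
      omega
    have hlen2 : ((jsOf cs (buildPos cs) (cs.length - (k + 1))).foldl
        (fun cur j => if cs.length - (k + 1) < j then
            cur.set j (1 + (loopB cs cs.length (buildPos cs) k).1.getD (j - 1) 0) else cur)
        (List.replicate cs.length 0)).length = cs.length := by
      rw [setFold_length]; simp
    have hrow2 : ∀ j, j < cs.length →
        ((jsOf cs (buildPos cs) (cs.length - (k + 1))).foldl
          (fun cur j => if cs.length - (k + 1) < j then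
              cur.set j (1 + (loopB cs cs.length (buildPos cs) k).1.getD (j - 1) 0) else cur)
          (List.replicate cs.length 0)).getD j 0 = stemSpec cs (cs.length - (k + 1)) j :=
      cur_getD cs (cs.length - (k + 1)) _ hprev
    refine ⟨hlen2, hrow2, ?_, ?_⟩
    · -- running max
      rw [drop_eq_map_range _ cs.length _ hlen2,
          List.map_congr_left (g := fun j => stemSpec cs (cs.length - (k + 1)) j)
            (fun j hjmem => by
              obtain ⟨hj1, hj2⟩ := List.mem_range'_1.mp hjmem
              exact hrow2 j (by omega)),
          List.foldl_map]
      rw [ihmax]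
      rw [show List.range' (cs.length - (k + 1)) (k + 1)
          = (cs.length - (k + 1)) :: List.range' (cs.length - (k + 1) + 1) k from List.range'_succ ..]
      rw [List.reverse_cons, List.foldl_append]
      rw [show cs.length - (k + 1) + 1 = cs.length - k by omega]
      simp only [List.foldl_cons, List.foldl_nil]
      unfold rowMax
      rw [Nat.max_def]
      split_ifs <;> omega
    · -- chunks
      rw [chunk_eq cs (cs.length - (k + 1)) _ hprev, ihch]
      rw [show List.range' (cs.length - (k + 1)) (k + 1)
          = (cs.length - (k + 1)) :: List.range' (cs.length - (k + 1) + 1) k from List.range'_succ ..]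
      rw [show cs.length - (k + 1) + 1 = cs.length - k by omega, List.map_cons]
      simp

set_option maxHeartbeats 1000000 in
lemma check_eq (sequence : String) :
    check_self_complementarity sequence = check_self_complementarity_alt sequence := by
  simp only [check_self_complementarity, check_self_complementarity_alt]
  generalize (PySem.Str.upper sequence).toList = cs
  obtain ⟨_, _, hmax, hch⟩ := loopB_spec cs cs.length (le_refl _)
  rw [hmax, hch]
  suffices h :
      (List.range cs.length).foldl
        (fun st i =>
          (List.range' (i + 4) (cs.length - (i + 4))).foldl
            (fun (st : Nat × List (Int × Int)) j =>
              (if st.1 < runA cs i j 0 (j + 1) then runA cs i j 0 (j + 1) else st.1,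
               if 3 ≤ runA cs i j 0 (j + 1) then st.2 ++ [((i : Int), (i : Int) + ((runA cs i j 0 (j + 1) : Nat) : Int) - 1)] else st.2))
            st)
        ((0 : Nat), ([] : List (Int × Int)))
      = (((List.range' (cs.length - cs.length) cs.length).reverse).foldl
           (fun m i => max m (rowMax cs i)) 0,
         ((List.range' (cs.length - cs.length) cs.length).map (rowChunk cs)).flatten) by
    rw [h]
  rw [show cs.length - cs.length = 0 by omega]
  rw [show List.range' 0 cs.length = List.range cs.length from (List.range_eq_range' ..).symm]
  rw [foldl_max_reverse, ← List.flatMap_def]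
  refine Eq.trans (PySem.List.foldl_congr_mem
      (g := fun st i => (List.range' (i + 4) (cs.length - (i + 4))).foldl
        (fun (st : Nat × List (Int × Int)) j =>
          (if st.1 < stemSpec cs i j then stemSpec cs i j else st.1,
           if 3 ≤ stemSpec cs i j
             then st.2 ++ [((i : Int), (i : Int) + ((stemSpec cs i j : Nat) : Int) - 1)]
             else st.2)) st)
      (init := ((0 : Nat), ([] : List (Int × Int)))) (h := ?_))
    (Eq.trans (splitA (fun i j => stemSpec cs i j)
      (fun i => List.range' (i + 4) (cs.length - (i + 4))) (List.range cs.length) 0 []) ?_)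
  · -- A's per-pair rescan value = the stem length, on every visited pair
    intro acc i hi
    beta_reduce
    apply PySem.List.foldl_congr_mem
    intro acc' j hj
    obtain ⟨hj1, hj2⟩ := List.mem_range'_1.mp hj
    have hrun : runA cs i j 0 (j + 1) = stemSpec cs i j := by
      rw [runA_eq_stemSpec cs (j + 1) i j 0 (by omega)]
      simp only [Nat.add_zero, Nat.sub_zero]
      rw [if_pos (by omega : i < j)]
    rw [hrun]
  · -- per-row folds: restart each row's max at 0, flatten the per-row chunks
    refine Prod.ext ?_ ?_
    · simp only
      apply PySem.List.foldl_congr_mem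
      intro acc i _
      exact foldl_max_init (stemSpec cs i) (List.range' (i + 4) (cs.length - (i + 4))) acc
    · simp only [List.nil_append]
      rfl

-- ===== VERDICT (by name: the statement is the Claim_ definition above) =====
theorem check_self_complementarity_spec : Claim_equal_check_self_complementarity := by
  intro s _
  exact check_eq s
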